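-- pv_equiv track=rewrite | github.com/Midodo22/Fall25-Network-Programming | hw2/client.py | normalize_board
-- ===== SOURCE A (Python) =====
-- def empty_board(width=10, height=20):
--     return [[0 for _ in range(width)] for _ in range(height)]
--
-- def normalize_board(board, width=10, height=20):
--     if not board:
--         return empty_board(width, height)
--     normalized = []
--     for y in range(height):
--         if y < len(board):
--             row = list(board[y][:width])
--             if len(row) < width:
--                 row.extend([0] * (width - len(row)))
--         else:
--             row = [0] * width
--         normalized.append(row)
--     return normalized
-- ===== SOURCE B (Python) =====
-- def normalize_board(board, width=10, height=20):
--     return [[board[y][x] if y < len(board) and x < len(board[y]) else 0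
--              for x in range(width)]
--             for y in range(height)]
-- ===== Notes on version B (the rewrite author's own statement) =====
-- stated objective: simpler
-- what changed: Replaces A's row loop (slice-copy each existing row, measure it, extend with zeros, else build a zero row, append to an accumulator) with a single nested per-cell comprehension: cell (y,x) is board[y][x] when both indices are in bounds and 0 otherwise; the empty-board guard, the row copying/padding and the accumulator disappear.
-- intended difference: For negative width (with some row among the first height rows longer than |width|) A's row[:width] slice applies Python's negative-stop rule and returns those rows truncated by |width| cells, while B returns rows with zero cells, the intended meaning of a non-positive column count. — e.g. on normalize_board([[1, 2, 3]], -1, 1): A returns [[1, 2]], B returns [[]]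
import Mathlib
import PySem

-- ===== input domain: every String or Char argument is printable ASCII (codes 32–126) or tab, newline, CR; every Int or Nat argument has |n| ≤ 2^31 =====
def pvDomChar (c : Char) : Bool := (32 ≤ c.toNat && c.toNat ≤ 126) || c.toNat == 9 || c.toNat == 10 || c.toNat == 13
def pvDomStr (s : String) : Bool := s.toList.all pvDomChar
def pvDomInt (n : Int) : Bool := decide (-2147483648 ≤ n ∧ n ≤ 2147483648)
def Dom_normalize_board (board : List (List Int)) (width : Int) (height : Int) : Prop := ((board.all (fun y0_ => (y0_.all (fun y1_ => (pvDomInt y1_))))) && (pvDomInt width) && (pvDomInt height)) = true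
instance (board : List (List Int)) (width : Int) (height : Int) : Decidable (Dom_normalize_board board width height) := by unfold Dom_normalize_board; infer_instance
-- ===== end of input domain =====

-- B builds the board cell by cell (a nested comprehension indexing board[y][x] with an in-bounds test)
-- instead of A's row loop with slicing, copying and zero-padding; same cost, simpler decomposition.

-- ===== PORT A =====
-- helper empty_board, literal: [[0 for _ in range(width)] for _ in range(height)]
def empty_board (width : Int) (height : Int) : List (List Int) :=
  (PySem.List.pyRange 0 height 1).map (fun _ =>
    (PySem.List.pyRange 0 width 1).map (fun _ => (0 : Int)))

def normalize_board (board : List (List Int)) (width : Int) (height : Int) : List (List Int) :=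
  if board = [] then empty_board width height
  else
    (PySem.List.pyRange 0 height 1).foldl (fun normalized y =>
      let row :=
        if y < PySem.List.len board then
          let r := PySem.List.slice (PySem.List.pyGetD board y []) none (some width)
          if PySem.List.len r < width then r ++ List.replicate (width - PySem.List.len r).toNat 0 else r
        else List.replicate width.toNat 0
      normalized ++ [row]) []

-- ===== PORT B =====
-- board[y][x] is evaluated only under the guard y < len(board) and x < len(board[y]) with y,x ≥ 0
-- (they come from range), so the total pyGetD is exact for Python's indexing here.
def normalize_board_alt (board : List (List Int)) (width : Int) (height : Int) : List (List Int) :=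
  (PySem.List.pyRange 0 height 1).map (fun y =>
    (PySem.List.pyRange 0 width 1).map (fun x =>
      if y < PySem.List.len board ∧ x < PySem.List.len (PySem.List.pyGetD board y []) then
        PySem.List.pyGetD (PySem.List.pyGetD board y []) x 0
      else 0))

-- ===== PRECONDITION & SPEC =====
-- For negative width A applies Python's negative-slice rule row[:width], so each existing row longer
-- than |width| comes back truncated by |width| cells, while B returns rows with zero cells — the
-- intended reading of a non-positive column count for a board-normalization routine.
def D_normalize_board (board : List (List Int)) (width : Int) (height : Int) : Prop :=
  width < 0 ∧ ∃ r ∈ board.take height.toNat, -width < (r.length : Int)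
instance (board : List (List Int)) (width : Int) (height : Int) : Decidable (D_normalize_board board width height) := by unfold D_normalize_board; infer_instance

def Spec_normalize_board (board : List (List Int)) (width : Int) (height : Int) (out : List (List Int)) : Prop := ¬ D_normalize_board board width height → out = normalize_board_alt board width height
instance (board : List (List Int)) (width : Int) (height : Int) (out : List (List Int)) : Decidable (Spec_normalize_board board width height out) := by unfold Spec_normalize_board; infer_instance

def pvDiffWitness_normalize_board : List (List Int) × Int × Int := ([[1, 2, 3]], -1, 1)
def pvDiffWitnessOut_normalize_board : (List (List Int)) × (List (List Int)) := ([[1, 2]], [[]])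

-- ===== CLAIM (what is proved, stated in full; the proofs are below) =====
def Claim_unchanged_normalize_board : Prop := ∀ (board : List (List Int)) (width : Int) (height : Int), Dom_normalize_board board width height → Spec_normalize_board board width height (normalize_board board width height)
def Claim_changed_normalize_board : Prop := Dom_normalize_board (pvDiffWitness_normalize_board.1) (pvDiffWitness_normalize_board.2.1) (pvDiffWitness_normalize_board.2.2) ∧ D_normalize_board (pvDiffWitness_normalize_board.1) (pvDiffWitness_normalize_board.2.1) (pvDiffWitness_normalize_board.2.2) ∧ normalize_board (pvDiffWitness_normalize_board.1) (pvDiffWitness_normalize_board.2.1) (pvDiffWitness_normalize_board.2.2) = pvDiffWitnessOut_normalize_board.1 ∧ normalize_board_alt (pvDiffWitness_normalize_board.1) (pvDiffWitness_normalize_board.2.1) (pvDiffWitness_normalize_board.2.2) = pvDiffWitnessOut_normalize_board.2 ∧ pvDiffWitnessOut_normalize_board.1 ≠ pvDiffWitnessOut_normalize_board.2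
def Claim_exact_normalize_board : Prop := ∀ (board : List (List Int)) (width : Int) (height : Int), Dom_normalize_board board width height → D_normalize_board board width height → normalize_board board width height ≠ normalize_board_alt board width height

-- ===== LEMMAS AND PROOFS =====

-- the padded/truncated row A produces for an existing board row
def padRowP (width : Int) (r : List Int) : List Int :=
  PySem.List.slice r none (some width) ++
    List.replicate (width - PySem.List.len (PySem.List.slice r none (some width))).toNat 0

-- an all-zero row of Python length max(width, 0)
def zrow (width : Int) : List Int := List.replicate width.toNat 0

-- A's in-board row computation equals padRowP (the extend is a no-op when the row is already wide enough)
lemma rowA_eq (width : Int) (r : List Int) :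
    (if PySem.List.len (PySem.List.slice r none (some width)) < width then
       PySem.List.slice r none (some width) ++
         List.replicate (width - PySem.List.len (PySem.List.slice r none (some width))).toNat 0
     else PySem.List.slice r none (some width)) = padRowP width r := by
  simp only [padRowP]
  split_ifs with h
  · rfl
  · simp [PySem.List.len_eq] at h
    simp
    omega

-- the canonical value of A's loop: existing (padded) rows then missing zero rows
lemma main_lemma (width : Int) :
    ∀ (bs : List (List Int)) (n : Nat),
    (List.range n).map (fun (k : Nat) => if (k : Int) < (bs.length : Int) then padRowP width (bs.getD k []) else zrow width)
    = (bs.take n).map (padRowP width) ++ List.replicate (n - bs.length) (zrow width)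
  | [], n => by
    have hneg : ∀ k ∈ List.range n,
        (if ((k : Nat) : Int) < (([] : List (List Int)).length : Int) then padRowP width (([] : List (List Int)).getD k []) else zrow width) = zrow width := by
      intro k _
      rw [if_neg]
      simp
    rw [List.map_congr_left hneg]
    simp [List.map_const']
  | b :: bs, 0 => by simp
  | b :: bs, n + 1 => by
    rw [List.range_succ_eq_map]
    simp only [List.map_cons, List.map_map]
    have h0 : ((0 : Nat) : Int) < ((b :: bs).length : Int) := by simp
    rw [if_pos h0]
    have hstep : ((List.range n).map ((fun (k : Nat) => if (k : Int) < ((b :: bs).length : Int) then padRowP width ((b :: bs).getD k []) else zrow width) ∘ Nat.succ))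
        = (List.range n).map (fun (k : Nat) => if (k : Int) < (bs.length : Int) then padRowP width (bs.getD k []) else zrow width) := by
      apply List.map_congr_left
      intro k _
      simp only [Function.comp, List.length_cons, List.getD_cons_succ, Nat.succ_eq_add_one]
      congr 1
      exact propext (by push_cast; constructor <;> intro <;> omega)
    rw [hstep, main_lemma width bs n]
    simp

-- A equals the canonical form (any width)
lemma origA (board : List (List Int)) (width height : Int) :
    normalize_board board width height
    = (board.take height.toNat).map (padRowP width) ++
      List.replicate (height.toNat - board.length) (zrow width) := by
  by_cases he : board = []
  · subst he
    simp only [normalize_board, empty_board]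
    rw [PySem.List.pyRange_one, PySem.List.pyRange_one]
    simp [Function.comp_def, List.map_const', zrow]
  · simp only [normalize_board, if_neg he]
    rw [PySem.List.foldl_append_singleton_eq_map]
    rw [PySem.List.pyRange_one]
    simp only [List.map_map, List.nil_append, sub_zero]
    have hrow : ∀ k ∈ List.range height.toNat,
        ((fun y => if y < PySem.List.len board then
            (if PySem.List.len (PySem.List.slice (PySem.List.pyGetD board y []) none (some width)) < width then
               PySem.List.slice (PySem.List.pyGetD board y []) none (some width) ++
                 List.replicate (width - PySem.List.len (PySem.List.slice (PySem.List.pyGetD board y []) none (some width))).toNat 0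
             else PySem.List.slice (PySem.List.pyGetD board y []) none (some width))
          else List.replicate width.toNat 0) ∘ (fun (k : Nat) => (0 : Int) + k)) k
        = (if (k : Int) < (board.length : Int) then padRowP width (board.getD k []) else zrow width) := by
      intro k _
      simp only [Function.comp, zero_add]
      rw [rowA_eq]
      simp [PySem.List.len_eq, zrow]
    rw [List.map_congr_left hrow, main_lemma]

-- B's row for an existing board row equals A's padded/truncated row, when width ≥ 0
lemma rowB_eq_pad (width : Int) (hw : 0 ≤ width) (r : List Int) :
    (List.range width.toNat).map (fun (x : Nat) => if (x : Int) < (r.length : Int) then r.getD x 0 else 0)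
    = padRowP width r := by
  have hslice : PySem.List.slice r none (some width) = r.take width.toNat :=
    PySem.List.slice_to r hw
  have hpad : padRowP width r
      = r.take width.toNat ++ List.replicate (width.toNat - min width.toNat r.length) 0 := by
    simp only [padRowP, hslice, PySem.List.len_eq, List.length_take]
    congr 2
    omega
  rw [hpad]
  apply List.ext_getElem
  · simp
  · intro i h1 h2
    simp only [List.getElem_map, List.getElem_range]
    simp only [List.length_map, List.length_range] at h1
    by_cases hir : i < r.length
    · rw [if_pos (by exact_mod_cast hir)]
      rw [List.getElem_append_left (by simp; omega)]
      simp [List.getD_eq_getElem?_getD, hir]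
    · rw [if_neg (by omega)]
      rw [List.getElem_append_right (by simp; omega)]
      simp

lemma altB_nonneg (board : List (List Int)) (width height : Int) (hw : 0 ≤ width) :
    normalize_board_alt board width height
    = (board.take height.toNat).map (padRowP width) ++
      List.replicate (height.toNat - board.length) (zrow width) := by
  simp only [normalize_board_alt]
  rw [PySem.List.pyRange_one 0 height, ← main_lemma width board height.toNat, List.map_map]
  simp only [sub_zero]
  apply List.map_congr_left
  intro k _
  simp only [Function.comp_apply, zero_add]
  rw [PySem.List.pyRange_one 0 width, List.map_map]
  simp only [Function.comp_def, zero_add, PySem.List.len_eq, sub_zero]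
  have hget : PySem.List.pyGetD board ((k : Nat) : Int) [] = board.getD k [] :=
    PySem.List.pyGetD_natCast board k []
  by_cases hk : (k : Int) < (board.length : Int)
  · rw [if_pos hk, ← rowB_eq_pad width hw (board.getD k [])]
    apply List.map_congr_left
    intro x _
    rw [hget]
    by_cases hx : (x : Int) < ((board.getD k []).length : Int)
    · rw [if_pos ⟨hk, hx⟩, if_pos hx]
      exact PySem.List.pyGetD_natCast (board.getD k []) x 0
    · rw [if_neg (fun hc => hx hc.2), if_neg hx]
  · rw [if_neg hk]
    exact (List.map_congr_left (g := fun _ => (0 : Int))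
        (fun x _ => if_neg (fun hc => hk hc.1))).trans (by simp [zrow, List.map_const'])

-- B returns only empty rows when width is negative
lemma altB_neg (board : List (List Int)) (width height : Int) (hw : width < 0) :
    normalize_board_alt board width height = List.replicate height.toNat [] := by
  simp only [normalize_board_alt]
  rw [PySem.List.pyRange_one 0 height, PySem.List.pyRange_one 0 width]
  have : (width - 0).toNat = 0 := by omega
  rw [this]
  simp [Function.comp_def, List.map_const']

-- A's padded row for a short row is empty when width is negative
lemma padRowP_neg_short (width : Int) (hw : width < 0) (r : List Int)
    (hr : (r.length : Int) ≤ -width) : padRowP width r = [] := by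
  have hk : 0 < (-width).toNat := by omega
  have hs : PySem.List.slice r none (some width) = r.take (r.length - (-width).toNat) := by
    have := PySem.List.slice_to_neg_natCast r (-width).toNat hk
    rwa [show (-(((-width).toNat : Nat) : Int)) = width by omega] at this
  have htake : r.length - (-width).toNat = 0 := by omega
  rw [padRowP, hs, htake]
  simp [PySem.List.len_eq]
  omega

-- A's padded row is nonempty when width is negative and the row is long enough
lemma padRowP_neg_long (width : Int) (hw : width < 0) (r : List Int)
    (hr : -width < (r.length : Int)) : padRowP width r ≠ [] := by
  have hk : 0 < (-width).toNat := by omega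
  have hs : PySem.List.slice r none (some width) = r.take (r.length - (-width).toNat) := by
    have := PySem.List.slice_to_neg_natCast r (-width).toNat hk
    rwa [show (-(((-width).toNat : Nat) : Int)) = width by omega] at this
  rw [padRowP, hs]
  intro h
  rw [List.append_eq_nil_iff] at h
  have := h.1
  rw [List.take_eq_nil_iff] at this
  rcases this with h' | h' <;> [omega; (rw [h'] at hr; simp at hr; omega)]

theorem ports_agree (board : List (List Int)) (width height : Int)
    (hnd : ¬ D_normalize_board board width height) :
    normalize_board board width height = normalize_board_alt board width height := by
  by_cases hw : 0 ≤ width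
  · rw [origA, altB_nonneg board width height hw]
  · have hw' : width < 0 := by omega
    have hall : ∀ r ∈ board.take height.toNat, (r.length : Int) ≤ -width := by
      intro r hr
      by_contra hlt
      exact hnd ⟨hw', r, hr, by omega⟩
    rw [origA, altB_neg board width height hw']
    have hrows : (board.take height.toNat).map (padRowP width)
        = List.replicate (board.take height.toNat).length [] := by
      rw [List.eq_replicate_iff]
      refine ⟨by simp, ?_⟩
      intro b hb
      rcases List.mem_map.mp hb with ⟨r, hr, rfl⟩
      exact padRowP_neg_short width hw' r (hall r hr)
    have hz : zrow width = [] := by simp [zrow]; omega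
    rw [hrows, hz, List.replicate_append_replicate]
    congr 1
    simp
    omega

-- ===== VERDICT (by name: the statement is the Claim_ definition above) =====
theorem normalize_board_spec : Claim_unchanged_normalize_board := by
  intro board width height _ hnd
  exact ports_agree board width height hnd

theorem normalize_board_changed : Claim_changed_normalize_board := by
  unfold Claim_changed_normalize_board; decide

theorem normalize_board_tight : Claim_exact_normalize_board := by
  intro board width height _ hd heq
  rcases hd with ⟨hw, r, hr, hlen⟩
  rw [origA, altB_neg board width height hw] at heq
  have hmem : padRowP width r ∈
      (board.take height.toNat).map (padRowP width) ++
        List.replicate (height.toNat - board.length) (zrow width) :=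
    List.mem_append_left _ (List.mem_map_of_mem hr)
  rw [heq] at hmem
  exact padRowP_neg_long width hw r hlen (List.eq_of_mem_replicate hmem)
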